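-- pv_equiv track=rewrite | github.com/bhadraakshay/2048-Game | 2048.py | left_movement
-- ===== SOURCE A (Python) =====
-- def left_movement(game_box): #function for left movement
--     i=0
--     moved=False
--     for j in range(0,4): #looping through all the rows
--         if game_box[i][j]!=0 or game_box[i+1][j]!=0 or game_box[i+2][j]!=0 or game_box[i+3][j]!=0:
--             if game_box[i][j]==0:
--                 while game_box[i][j] == 0:
--                     game_box[i][j] = game_box[i+1][j]
--                     game_box[i+1][j] = game_box[i+2][j]
--                     game_box[i+2][j] = game_box[i+3][j]
--                     game_box[i+3][j] = 0
--                     moved=True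
--
--             if game_box[i+1][j]==0 and (game_box[i+2][j]!=0 or game_box[i+3][j]!=0):
--                 while game_box[i+1][j]==0:
--                     game_box[i+1][j] = game_box[i+2][j]
--                     game_box[i+2][j] = game_box[i+3][j]
--                     game_box[i+3][j] = 0
--                     moved=True
--
--             if game_box[i+2][j] == 0 and game_box[i+3][j]!=0:
--                 while game_box[i+2][j]==0:
--                     game_box[i+2][j] = game_box[i+3][j]
--                     game_box[i+3][j] = 0
--                     moved=True
--     return moved
-- ===== SOURCE B (Python) =====
-- def left_movement(game_box):  # column-wise compaction: read column, drop zeros, pad, compare, write back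
--     moved = False
--     for j in range(0, 4):
--         col = [game_box[r][j] for r in range(0, 4)]
--         new = [v for v in col if v != 0]
--         new = new + [0] * (4 - len(new))
--         if new != col:
--             moved = True
--             for r in range(0, 4):
--                 game_box[r][j] = new[r]
--     return moved
-- ===== Notes on version B (the rewrite author's own statement) =====
-- stated objective: simpler
-- what changed: Replaces A's three cascaded position-specific while-loops of in-place shifts per column by a single read-filter-pad of each column (new = nonzeros + zero padding), setting moved by comparing the new column with the old and writing it back once.
-- outside the precondition, e.g. on left_movement([[1, 1, 1, 1], [1, 1, 1, 1], [1, 1, 1, 1], []]): A returns False, B raises IndexError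
import Mathlib
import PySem

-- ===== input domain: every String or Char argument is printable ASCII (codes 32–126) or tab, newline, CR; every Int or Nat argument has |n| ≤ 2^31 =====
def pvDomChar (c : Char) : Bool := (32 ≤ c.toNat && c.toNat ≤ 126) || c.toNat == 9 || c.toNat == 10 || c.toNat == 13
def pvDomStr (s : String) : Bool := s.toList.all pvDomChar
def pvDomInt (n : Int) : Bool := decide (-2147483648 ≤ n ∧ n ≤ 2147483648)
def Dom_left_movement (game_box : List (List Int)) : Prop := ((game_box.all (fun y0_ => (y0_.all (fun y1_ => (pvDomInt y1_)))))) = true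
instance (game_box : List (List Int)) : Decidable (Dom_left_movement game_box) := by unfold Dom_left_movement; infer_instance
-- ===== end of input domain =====

-- B replaces A's cascaded per-position shift loops by a read-filter-pad of each column (simpler);
-- both programs mutate game_box the same way in place, the theorem is about the returned Bool.

-- ===== PORT A =====
-- game_box[r][j] read / write (indices are the literal nonnegative 0..3 of A's code; the default
-- branch of getD / the no-op of set is only reached outside Pre_, where nothing is claimed)
def pvCell (gb : List (List Int)) (r j : Nat) : Int := (gb.getD r []).getD j 0
def pvSet (gb : List (List Int)) (r j : Nat) (v : Int) : List (List Int) :=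
  gb.set r ((gb.getD r []).set j v)

-- the three while-loops; within Pre_ each runs at most 3 iterations, so fuel 4 is exact there
def pvWhile0 : Nat → List (List Int) → Nat → Bool → List (List Int) × Bool
  | 0, gb, _, moved => (gb, moved)
  | fuel+1, gb, j, moved =>
    if pvCell gb 0 j == 0 then
      let gb := pvSet gb 0 j (pvCell gb 1 j)
      let gb := pvSet gb 1 j (pvCell gb 2 j)
      let gb := pvSet gb 2 j (pvCell gb 3 j)
      let gb := pvSet gb 3 j 0
      pvWhile0 fuel gb j true
    else (gb, moved)

def pvWhile1 : Nat → List (List Int) → Nat → Bool → List (List Int) × Bool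
  | 0, gb, _, moved => (gb, moved)
  | fuel+1, gb, j, moved =>
    if pvCell gb 1 j == 0 then
      let gb := pvSet gb 1 j (pvCell gb 2 j)
      let gb := pvSet gb 2 j (pvCell gb 3 j)
      let gb := pvSet gb 3 j 0
      pvWhile1 fuel gb j true
    else (gb, moved)

def pvWhile2 : Nat → List (List Int) → Nat → Bool → List (List Int) × Bool
  | 0, gb, _, moved => (gb, moved)
  | fuel+1, gb, j, moved =>
    if pvCell gb 2 j == 0 then
      let gb := pvSet gb 2 j (pvCell gb 3 j)
      let gb := pvSet gb 3 j 0
      pvWhile2 fuel gb j true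
    else (gb, moved)

def pvStep (s : List (List Int) × Bool) (j : Nat) : List (List Int) × Bool :=
  match s with
  | (gb, moved) =>
    if pvCell gb 0 j != 0 || pvCell gb 1 j != 0 || pvCell gb 2 j != 0 || pvCell gb 3 j != 0 then
      let s := if pvCell gb 0 j == 0 then pvWhile0 4 gb j moved else (gb, moved)
      let s := if pvCell s.1 1 j == 0 && (pvCell s.1 2 j != 0 || pvCell s.1 3 j != 0) then
                 pvWhile1 4 s.1 j s.2 else s
      let s := if pvCell s.1 2 j == 0 && pvCell s.1 3 j != 0 then
                 pvWhile2 4 s.1 j s.2 else s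
      s
    else (gb, moved)

def left_movement (game_box : List (List Int)) : Bool :=
  ((PySem.List.pyRange 0 4 1).foldl (fun s j => pvStep s j.toNat) (game_box, false)).2

-- ===== PORT B =====
def bStep (s : List (List Int) × Bool) (j : Nat) : List (List Int) × Bool :=
  let col := (PySem.List.pyRange 0 4 1).map (fun r => pvCell s.1 r.toNat j)
  let nw := col.filter (fun v => v != 0)
  let nw := nw ++ List.replicate (4 - nw.length) 0
  if nw ≠ col then
    ((PySem.List.pyRange 0 4 1).foldl (fun gb r => pvSet gb r.toNat j (nw.getD r.toNat 0)) s.1, true)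
  else s

def left_movement_alt (game_box : List (List Int)) : Bool :=
  ((PySem.List.pyRange 0 4 1).foldl (fun s j => bStep s j.toNat) (game_box, false)).2

-- ===== PRECONDITION & SPEC =====
-- Pre_ requires the full 4×4 shape A's loops address. It excludes under-sized boards on which A
-- raises IndexError, and also the degenerate under-sized boards on which A's lazy short-circuit
-- evaluation happens to avoid the missing cells and return False; B raises IndexError on those.
def Pre_left_movement (game_box : List (List Int)) : Prop :=
  4 ≤ game_box.length ∧ 4 ≤ (game_box.getD 0 []).length ∧ 4 ≤ (game_box.getD 1 []).length ∧
    4 ≤ (game_box.getD 2 []).length ∧ 4 ≤ (game_box.getD 3 []).length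
instance (game_box : List (List Int)) : Decidable (Pre_left_movement game_box) := by
  unfold Pre_left_movement; infer_instance

def pvWitness_left_movement : List (List Int) :=
  [[2, 0, 0, 0], [0, 2, 0, 0], [0, 0, 0, 0], [4, 0, 0, 2]]

def Spec_left_movement (game_box : List (List Int)) (out : Bool) : Prop := out = left_movement_alt game_box
instance (game_box : List (List Int)) (out : Bool) : Decidable (Spec_left_movement game_box out) := by unfold Spec_left_movement; infer_instance

-- ===== CLAIM (what is proved, stated in full; the proofs are below) =====
def Claim_equal_left_movement : Prop := ∀ (game_box : List (List Int)), Dom_left_movement game_box → Pre_left_movement game_box → Spec_left_movement game_box (left_movement game_box)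

-- ===== LEMMAS AND PROOFS =====

-- basic facts about the cell/row accessors
theorem pvSet_length (gb : List (List Int)) (r j : Nat) (v : Int) :
    (pvSet gb r j v).length = gb.length := by simp [pvSet]

theorem pvSet_rowlen (gb : List (List Int)) (r j : Nat) (v : Int) (r' : Nat) :
    ((pvSet gb r j v).getD r' []).length = (gb.getD r' []).length := by
  unfold pvSet
  by_cases h : r = r'
  · subst h
    by_cases hr : r < gb.length
    · simp [List.getD, List.getElem?_set, hr]
    · simp [List.getD, List.getElem?_set, hr]
  · simp [List.getD, List.getElem?_set, h]

theorem pvCell_pvSet_ne_row (gb : List (List Int)) (r j : Nat) (v : Int) (r' j' : Nat)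
    (h : r ≠ r') : pvCell (pvSet gb r j v) r' j' = pvCell gb r' j' := by
  simp [pvCell, pvSet, List.getD, List.getElem?_set, h]

theorem pvCell_pvSet_ne_col (gb : List (List Int)) (r j : Nat) (v : Int) (r' j' : Nat)
    (h : j ≠ j') : pvCell (pvSet gb r j v) r' j' = pvCell gb r' j' := by
  unfold pvCell pvSet
  by_cases hr : r = r'
  · subst hr
    by_cases hlt : r < gb.length
    · simp [List.getD, List.getElem?_set, hlt, h]
    · simp [List.getD, List.getElem?_set, hlt]
  · simp [List.getD, List.getElem?_set, hr]

theorem pvCell_pvSet_same (gb : List (List Int)) (r j : Nat) (v : Int)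
    (h1 : r < gb.length) (h2 : j < (gb.getD r []).length) :
    pvCell (pvSet gb r j v) r j = v := by
  have h2' : j < gb[r].length := by
    simpa [List.getD, List.getElem?_eq_getElem h1] using h2
  simp [pvCell, pvSet, List.getD, List.getElem?_set, h1, h2']

theorem pvSet_oob (gb : List (List Int)) (r j : Nat) (v : Int)
    (h : ¬(r < gb.length ∧ j < (gb.getD r []).length)) : pvSet gb r j v = gb := by
  unfold pvSet
  by_cases hr : r < gb.length
  · have hj : ¬ j < (gb.getD r []).length := by tauto
    have hrow : gb.getD r [] = gb[r] := by
      simp [List.getD, List.getElem?_eq_getElem hr]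
    have hj' : gb[r].length ≤ j := by rw [hrow] at hj; omega
    rw [hrow, List.set_eq_of_length_le hj']
    exact List.set_getElem_self hr
  · exact List.set_eq_of_length_le (by omega)

-- master read-after-write equation, simp-friendly
theorem pvCell_pvSet (gb : List (List Int)) (r j : Nat) (v : Int) (r' j' : Nat) :
    pvCell (pvSet gb r j v) r' j' =
      if r = r' ∧ j = j' ∧ r < gb.length ∧ j < (gb.getD r []).length then v
      else pvCell gb r' j' := by
  split_ifs with h
  · obtain ⟨h1, h2, h3, h4⟩ := h
    subst h1; subst h2
    exact pvCell_pvSet_same gb r j v h3 h4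
  · by_cases h1 : r = r'
    · subst h1
      by_cases h2 : j = j'
      · subst h2
        rw [pvSet_oob gb r j v (by tauto)]
      · exact pvCell_pvSet_ne_col gb r j v r j' h2
    · exact pvCell_pvSet_ne_row gb r j v r' j' h1

-- the four cells of column j, top to bottom
def colOf (gb : List (List Int)) (j : Nat) : List Int :=
  [pvCell gb 0 j, pvCell gb 1 j, pvCell gb 2 j, pvCell gb 3 j]

-- the compacted column B computes
def packCol (c : List Int) : List Int :=
  c.filter (fun v => v != 0) ++ List.replicate (4 - (c.filter (fun v => v != 0)).length) 0

theorem packCol_length (c : List Int) (h : c.length = 4) : (packCol c).length = 4 := by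
  have : (c.filter (fun v => v != 0)).length ≤ 4 := by
    calc (c.filter (fun v => v != 0)).length ≤ c.length := List.length_filter_le _ _
    _ = 4 := h
  simp [packCol]; omega

theorem getD_list4 (c : List Int) (h : c.length = 4) :
    [c.getD 0 0, c.getD 1 0, c.getD 2 0, c.getD 3 0] = c := by
  rcases c with _ | ⟨a, _ | ⟨b, _ | ⟨d, _ | ⟨e, _ | _⟩⟩⟩⟩ <;> simp_all

theorem pre_pvSet (gb : List (List Int)) (r j : Nat) (v : Int) (h : Pre_left_movement gb) :
    Pre_left_movement (pvSet gb r j v) := by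
  obtain ⟨a, b, c, d, e⟩ := h
  exact ⟨by rw [pvSet_length]; exact a, by rw [pvSet_rowlen]; exact b,
    by rw [pvSet_rowlen]; exact c, by rw [pvSet_rowlen]; exact d, by rw [pvSet_rowlen]; exact e⟩

theorem bStep_spec (gbB : List (List Int)) (m : Bool) (j : Nat)
    (hB : Pre_left_movement gbB) (hj : j < 4) :
    (bStep (gbB, m) j).2 = (if packCol (colOf gbB j) = colOf gbB j then m else true) ∧
      Pre_left_movement (bStep (gbB, m) j).1 ∧
      colOf (bStep (gbB, m) j).1 j = packCol (colOf gbB j) ∧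
      ∀ j', j' < 4 → j' ≠ j → colOf (bStep (gbB, m) j).1 j' = colOf gbB j' := by
  obtain ⟨hL, h0, h1, h2, h3⟩ := hB
  have haL0 : (0:Nat) < gbB.length := by omega
  have haL1 : (1:Nat) < gbB.length := by omega
  have haL2 : (2:Nat) < gbB.length := by omega
  have haL3 : (3:Nat) < gbB.length := by omega
  have haj0 : j < (gbB.getD 0 []).length := by omega
  have haj1 : j < (gbB.getD 1 []).length := by omega
  have haj2 : j < (gbB.getD 2 []).length := by omega
  have haj3 : j < (gbB.getD 3 []).length := by omega
  have hrange : PySem.List.pyRange 0 4 1 = [0, 1, 2, 3] := by decide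
  have hcol : (PySem.List.pyRange 0 4 1).map (fun r => pvCell gbB r.toNat j) = colOf gbB j := by
    simp [hrange, colOf]
  have hclen : (colOf gbB j).length = 4 := by simp [colOf]
  have hplen := packCol_length (colOf gbB j) hclen
  by_cases hch : packCol (colOf gbB j) = colOf gbB j
  · have : bStep (gbB, m) j = (gbB, m) := by
      simp only [bStep, hcol]
      rw [if_neg]
      simp [packCol] at hch
      simp [packCol, hch]
    rw [this]
    exact ⟨by rw [if_pos hch], ⟨hL, h0, h1, h2, h3⟩, by rw [hch], fun _ _ _ => rfl⟩
  · have hres : bStep (gbB, m) j =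
        ((PySem.List.pyRange 0 4 1).foldl
          (fun gb r => pvSet gb r.toNat j ((packCol (colOf gbB j)).getD r.toNat 0)) gbB, true) := by
      simp only [bStep, hcol]
      rw [if_pos]
      · rfl
      · simpa [packCol] using hch
    rw [hres, hrange]
    refine ⟨by rw [if_neg hch], ?_, ?_, ?_⟩
    · simp only [List.foldl]
      exact pre_pvSet _ _ _ _ (pre_pvSet _ _ _ _ (pre_pvSet _ _ _ _ (pre_pvSet _ _ _ _
        ⟨hL, h0, h1, h2, h3⟩)))
    · have h4 := getD_list4 (packCol (colOf gbB j)) hplen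
      have hg0 : j < gbB[0].length := by
        simpa [List.getD, List.getElem?_eq_getElem haL0] using haj0
      have hg1 : j < gbB[1].length := by
        simpa [List.getD, List.getElem?_eq_getElem haL1] using haj1
      have hg2 : j < gbB[2].length := by
        simpa [List.getD, List.getElem?_eq_getElem haL2] using haj2
      have hg3 : j < gbB[3].length := by
        simpa [List.getD, List.getElem?_eq_getElem haL3] using haj3
      simp only [List.foldl]
      simp only [colOf] at h4 ⊢
      simp only [pvCell_pvSet, pvSet_length, pvSet_rowlen]
      norm_num [hg0, hg1, hg2, hg3, haL0, haL1, haL2, haL3,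
        (by decide : Int.toNat 2 = 2), (by decide : Int.toNat 3 = 3)]
      exact h4
    · intro j' hj4 hne
      have hcc : ∀ (g : List (List Int)) (r : Nat) (v : Int) (r' : Nat),
          pvCell (pvSet g r j v) r' j' = pvCell g r' j' :=
        fun g r v r' => pvCell_pvSet_ne_col g r j v r' j' (fun h => hne h.symm)
      simp only [List.foldl]
      simp [colOf, hcc]

theorem colOf_pvSet_ne (g : List (List Int)) (r j : Nat) (v : Int) (j' : Nat) (hne : j ≠ j') :
    colOf (pvSet g r j v) j' = colOf g j' := by
  simp [colOf, pvCell_pvSet_ne_col _ _ _ _ _ _ hne]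

theorem pvWhile0_inv (fuel : Nat) (gb : List (List Int)) (j : Nat) (m : Bool)
    (h : Pre_left_movement gb) :
    Pre_left_movement (pvWhile0 fuel gb j m).1 ∧
      ∀ j', j ≠ j' → colOf (pvWhile0 fuel gb j m).1 j' = colOf gb j' := by
  induction fuel generalizing gb m with
  | zero => exact ⟨h, fun _ _ => rfl⟩
  | succ n ih =>
    rw [pvWhile0]
    by_cases hc : (pvCell gb 0 j == 0) = true
    · rw [if_pos hc]
      refine ⟨(ih _ true ?_).1, fun j' hne => ((ih _ true ?_).2 j' hne).trans ?_⟩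
      · exact pre_pvSet _ _ _ _ (pre_pvSet _ _ _ _ (pre_pvSet _ _ _ _ (pre_pvSet _ _ _ _ (h))))
      · exact pre_pvSet _ _ _ _ (pre_pvSet _ _ _ _ (pre_pvSet _ _ _ _ (pre_pvSet _ _ _ _ (h))))
      · rw [colOf_pvSet_ne _ _ _ _ _ hne, colOf_pvSet_ne _ _ _ _ _ hne, colOf_pvSet_ne _ _ _ _ _ hne, colOf_pvSet_ne _ _ _ _ _ hne]
    · rw [if_neg hc]; exact ⟨h, fun _ _ => rfl⟩

theorem pvWhile1_inv (fuel : Nat) (gb : List (List Int)) (j : Nat) (m : Bool)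
    (h : Pre_left_movement gb) :
    Pre_left_movement (pvWhile1 fuel gb j m).1 ∧
      ∀ j', j ≠ j' → colOf (pvWhile1 fuel gb j m).1 j' = colOf gb j' := by
  induction fuel generalizing gb m with
  | zero => exact ⟨h, fun _ _ => rfl⟩
  | succ n ih =>
    rw [pvWhile1]
    by_cases hc : (pvCell gb 1 j == 0) = true
    · rw [if_pos hc]
      refine ⟨(ih _ true ?_).1, fun j' hne => ((ih _ true ?_).2 j' hne).trans ?_⟩
      · exact pre_pvSet _ _ _ _ (pre_pvSet _ _ _ _ (pre_pvSet _ _ _ _ (h)))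
      · exact pre_pvSet _ _ _ _ (pre_pvSet _ _ _ _ (pre_pvSet _ _ _ _ (h)))
      · rw [colOf_pvSet_ne _ _ _ _ _ hne, colOf_pvSet_ne _ _ _ _ _ hne, colOf_pvSet_ne _ _ _ _ _ hne]
    · rw [if_neg hc]; exact ⟨h, fun _ _ => rfl⟩

theorem pvWhile2_inv (fuel : Nat) (gb : List (List Int)) (j : Nat) (m : Bool)
    (h : Pre_left_movement gb) :
    Pre_left_movement (pvWhile2 fuel gb j m).1 ∧
      ∀ j', j ≠ j' → colOf (pvWhile2 fuel gb j m).1 j' = colOf gb j' := by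
  induction fuel generalizing gb m with
  | zero => exact ⟨h, fun _ _ => rfl⟩
  | succ n ih =>
    rw [pvWhile2]
    by_cases hc : (pvCell gb 2 j == 0) = true
    · rw [if_pos hc]
      refine ⟨(ih _ true ?_).1, fun j' hne => ((ih _ true ?_).2 j' hne).trans ?_⟩
      · exact pre_pvSet _ _ _ _ (pre_pvSet _ _ _ _ (h))
      · exact pre_pvSet _ _ _ _ (pre_pvSet _ _ _ _ (h))
      · rw [colOf_pvSet_ne _ _ _ _ _ hne, colOf_pvSet_ne _ _ _ _ _ hne]
    · rw [if_neg hc]; exact ⟨h, fun _ _ => rfl⟩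

theorem pvStep_inv (gb : List (List Int)) (m : Bool) (j : Nat) (h : Pre_left_movement gb) :
    Pre_left_movement (pvStep (gb, m) j).1 ∧
      ∀ j', j ≠ j' → colOf (pvStep (gb, m) j).1 j' = colOf gb j' := by
  show Pre_left_movement (pvStep (gb, m) j).1 ∧ _
  simp only [pvStep]
  by_cases hg : (pvCell gb 0 j != 0 || pvCell gb 1 j != 0 || pvCell gb 2 j != 0 || pvCell gb 3 j != 0) = true
  · rw [if_pos hg]
    have s1 : Pre_left_movement (if pvCell gb 0 j == 0 then pvWhile0 4 gb j m else (gb, m)).1 ∧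
        ∀ j', j ≠ j' → colOf (if pvCell gb 0 j == 0 then pvWhile0 4 gb j m else (gb, m)).1 j' = colOf gb j' := by
      by_cases hc : (pvCell gb 0 j == 0) = true
      · rw [if_pos hc]; exact pvWhile0_inv 4 gb j m h
      · rw [if_neg hc]; exact ⟨h, fun _ _ => rfl⟩
    generalize (if pvCell gb 0 j == 0 then pvWhile0 4 gb j m else (gb, m)) = s at s1 ⊢
    obtain ⟨p1, p2⟩ := s1
    have s2 : ∀ t : List (List Int) × Bool,
        Pre_left_movement t.1 → (∀ j', j ≠ j' → colOf t.1 j' = colOf gb j') →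
        Pre_left_movement (if pvCell t.1 1 j == 0 && (pvCell t.1 2 j != 0 || pvCell t.1 3 j != 0)
            then pvWhile1 4 t.1 j t.2 else t).1 ∧
          ∀ j', j ≠ j' → colOf (if pvCell t.1 1 j == 0 && (pvCell t.1 2 j != 0 || pvCell t.1 3 j != 0)
            then pvWhile1 4 t.1 j t.2 else t).1 j' = colOf gb j' := by
      intro t ht hcols
      by_cases hc : (pvCell t.1 1 j == 0 && (pvCell t.1 2 j != 0 || pvCell t.1 3 j != 0)) = true
      · rw [if_pos hc]
        obtain ⟨q1, q2⟩ := pvWhile1_inv 4 t.1 j t.2 ht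
        exact ⟨q1, fun j' hne => (q2 j' hne).trans (hcols j' hne)⟩
      · rw [if_neg hc]; exact ⟨ht, hcols⟩
    obtain ⟨q1, q2⟩ := s2 s p1 p2
    generalize (if pvCell s.1 1 j == 0 && (pvCell s.1 2 j != 0 || pvCell s.1 3 j != 0)
        then pvWhile1 4 s.1 j s.2 else s) = t at q1 q2 ⊢
    by_cases hc : (pvCell t.1 2 j == 0 && pvCell t.1 3 j != 0) = true
    · rw [if_pos hc]
      obtain ⟨r1, r2⟩ := pvWhile2_inv 4 t.1 j t.2 q1
      exact ⟨r1, fun j' hne => (r2 j' hne).trans (q2 j' hne)⟩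
    · rw [if_neg hc]; exact ⟨q1, q2⟩
  · rw [if_neg hg]; exact ⟨h, fun _ _ => rfl⟩

theorem cells_of_col (g : List (List Int)) (j : Nat) (a b c d : Int)
    (h : colOf g j = [a, b, c, d]) :
    pvCell g 0 j = a ∧ pvCell g 1 j = b ∧ pvCell g 2 j = c ∧ pvCell g 3 j = d := by
  simpa [colOf] using h

-- one execution of each while-loop body
def shift0 (gb : List (List Int)) (j : Nat) : List (List Int) :=
  let g1 := pvSet gb 0 j (pvCell gb 1 j)
  let g2 := pvSet g1 1 j (pvCell g1 2 j)
  let g3 := pvSet g2 2 j (pvCell g2 3 j)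
  pvSet g3 3 j 0

def shift1 (gb : List (List Int)) (j : Nat) : List (List Int) :=
  let g2 := pvSet gb 1 j (pvCell gb 2 j)
  let g3 := pvSet g2 2 j (pvCell g2 3 j)
  pvSet g3 3 j 0

def shift2 (gb : List (List Int)) (j : Nat) : List (List Int) :=
  let g3 := pvSet gb 2 j (pvCell gb 3 j)
  pvSet g3 3 j 0

theorem pvWhile0_succ (n : Nat) (gb : List (List Int)) (j : Nat) (m : Bool) :
    pvWhile0 (n+1) gb j m =
      if pvCell gb 0 j == 0 then pvWhile0 n (shift0 gb j) j true else (gb, m) := rfl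

theorem pvWhile1_succ (n : Nat) (gb : List (List Int)) (j : Nat) (m : Bool) :
    pvWhile1 (n+1) gb j m =
      if pvCell gb 1 j == 0 then pvWhile1 n (shift1 gb j) j true else (gb, m) := rfl

theorem pvWhile2_succ (n : Nat) (gb : List (List Int)) (j : Nat) (m : Bool) :
    pvWhile2 (n+1) gb j m =
      if pvCell gb 2 j == 0 then pvWhile2 n (shift2 gb j) j true else (gb, m) := rfl

theorem shift0_pre (gb : List (List Int)) (j : Nat) (h : Pre_left_movement gb) :
    Pre_left_movement (shift0 gb j) :=
  pre_pvSet _ _ _ _ (pre_pvSet _ _ _ _ (pre_pvSet _ _ _ _ (pre_pvSet _ _ _ _ h)))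

theorem shift1_pre (gb : List (List Int)) (j : Nat) (h : Pre_left_movement gb) :
    Pre_left_movement (shift1 gb j) :=
  pre_pvSet _ _ _ _ (pre_pvSet _ _ _ _ (pre_pvSet _ _ _ _ h))

theorem shift2_pre (gb : List (List Int)) (j : Nat) (h : Pre_left_movement gb) :
    Pre_left_movement (shift2 gb j) :=
  pre_pvSet _ _ _ _ (pre_pvSet _ _ _ _ h)

theorem shift0_col (gb : List (List Int)) (j : Nat)
    (hA : Pre_left_movement gb) (hj : j < 4) :
    colOf (shift0 gb j) j = [pvCell gb 1 j, pvCell gb 2 j, pvCell gb 3 j, 0] := by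
  obtain ⟨hL, h0, h1, h2, h3⟩ := hA
  have haL0 : (0:Nat) < gb.length := by omega
  have haL1 : (1:Nat) < gb.length := by omega
  have haL2 : (2:Nat) < gb.length := by omega
  have haL3 : (3:Nat) < gb.length := by omega
  have hg0 : j < gb[0].length := by
    simpa [List.getD, List.getElem?_eq_getElem haL0] using (by omega : j < (gb.getD 0 []).length)
  have hg1 : j < gb[1].length := by
    simpa [List.getD, List.getElem?_eq_getElem haL1] using (by omega : j < (gb.getD 1 []).length)
  have hg2 : j < gb[2].length := by
    simpa [List.getD, List.getElem?_eq_getElem haL2] using (by omega : j < (gb.getD 2 []).length)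
  have hg3 : j < gb[3].length := by
    simpa [List.getD, List.getElem?_eq_getElem haL3] using (by omega : j < (gb.getD 3 []).length)
  simp only [shift0, colOf]
  simp only [pvCell_pvSet, pvSet_length, pvSet_rowlen]
  norm_num [hg0, hg1, hg2, hg3, haL0, haL1, haL2, haL3]

theorem shift1_col (gb : List (List Int)) (j : Nat)
    (hA : Pre_left_movement gb) (hj : j < 4) :
    colOf (shift1 gb j) j = [pvCell gb 0 j, pvCell gb 2 j, pvCell gb 3 j, 0] := by
  obtain ⟨hL, h0, h1, h2, h3⟩ := hA
  have haL0 : (0:Nat) < gb.length := by omega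
  have haL1 : (1:Nat) < gb.length := by omega
  have haL2 : (2:Nat) < gb.length := by omega
  have haL3 : (3:Nat) < gb.length := by omega
  have hg1 : j < gb[1].length := by
    simpa [List.getD, List.getElem?_eq_getElem haL1] using (by omega : j < (gb.getD 1 []).length)
  have hg2 : j < gb[2].length := by
    simpa [List.getD, List.getElem?_eq_getElem haL2] using (by omega : j < (gb.getD 2 []).length)
  have hg3 : j < gb[3].length := by
    simpa [List.getD, List.getElem?_eq_getElem haL3] using (by omega : j < (gb.getD 3 []).length)
  simp only [shift1, colOf]
  simp only [pvCell_pvSet, pvSet_length, pvSet_rowlen]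
  norm_num [hg1, hg2, hg3, haL1, haL2, haL3]

theorem shift2_col (gb : List (List Int)) (j : Nat)
    (hA : Pre_left_movement gb) (hj : j < 4) :
    colOf (shift2 gb j) j = [pvCell gb 0 j, pvCell gb 1 j, pvCell gb 3 j, 0] := by
  obtain ⟨hL, h0, h1, h2, h3⟩ := hA
  have haL2 : (2:Nat) < gb.length := by omega
  have haL3 : (3:Nat) < gb.length := by omega
  have hg2 : j < gb[2].length := by
    simpa [List.getD, List.getElem?_eq_getElem haL2] using (by omega : j < (gb.getD 2 []).length)
  have hg3 : j < gb[3].length := by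
    simpa [List.getD, List.getElem?_eq_getElem haL3] using (by omega : j < (gb.getD 3 []).length)
  simp only [shift2, colOf]
  simp only [pvCell_pvSet, pvSet_length, pvSet_rowlen]
  norm_num [hg2, hg3, haL2, haL3]

-- the second and third if-blocks of pvStep, as standalone functions (definitional repackaging)
def pvStep2 (s : List (List Int) × Bool) (j : Nat) : List (List Int) × Bool :=
  if pvCell s.1 1 j == 0 && (pvCell s.1 2 j != 0 || pvCell s.1 3 j != 0) then
    pvWhile1 4 s.1 j s.2 else s

def pvStep3 (s : List (List Int) × Bool) (j : Nat) : List (List Int) × Bool :=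
  if pvCell s.1 2 j == 0 && pvCell s.1 3 j != 0 then pvWhile2 4 s.1 j s.2 else s

theorem pvStep_eq (gb : List (List Int)) (m : Bool) (j : Nat) :
    pvStep (gb, m) j =
      if pvCell gb 0 j != 0 || pvCell gb 1 j != 0 || pvCell gb 2 j != 0 || pvCell gb 3 j != 0 then
        pvStep3 (pvStep2 (if pvCell gb 0 j == 0 then pvWhile0 4 gb j m else (gb, m)) j) j
      else (gb, m) := rfl

theorem while0_run1 (gb : List (List Int)) (j : Nat) (m : Bool) (b c d : Int)
    (hP : Pre_left_movement gb) (hj : j < 4)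
    (hcol : colOf gb j = [0, b, c, d]) (hb : b ≠ 0) :
    pvWhile0 4 gb j m = (shift0 gb j, true) := by
  obtain ⟨e0, e1, e2, e3⟩ := cells_of_col _ _ _ _ _ _ hcol
  obtain ⟨f0, f1, f2, f3⟩ := cells_of_col _ _ _ _ _ _ (shift0_col gb j hP hj)
  rw [pvWhile0_succ, if_pos (by simp [e0]), pvWhile0_succ,
    if_neg (by simp [f0, e1, hb])]

theorem while0_run2 (gb : List (List Int)) (j : Nat) (m : Bool) (c d : Int)
    (hP : Pre_left_movement gb) (hj : j < 4)
    (hcol : colOf gb j = [0, 0, c, d]) (hc : c ≠ 0) :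
    pvWhile0 4 gb j m = (shift0 (shift0 gb j) j, true) := by
  obtain ⟨e0, e1, e2, e3⟩ := cells_of_col _ _ _ _ _ _ hcol
  have hP1 := shift0_pre gb j hP
  obtain ⟨f0, f1, f2, f3⟩ := cells_of_col _ _ _ _ _ _ (shift0_col gb j hP hj)
  obtain ⟨g0, g1, g2, g3⟩ := cells_of_col _ _ _ _ _ _ (shift0_col (shift0 gb j) j hP1 hj)
  rw [pvWhile0_succ, if_pos (by simp [e0]), pvWhile0_succ, if_pos (by simp [f0, e1]),
    pvWhile0_succ, if_neg (by simp [g0, f1, e2, hc])]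

theorem while0_run3 (gb : List (List Int)) (j : Nat) (m : Bool) (d : Int)
    (hP : Pre_left_movement gb) (hj : j < 4)
    (hcol : colOf gb j = [0, 0, 0, d]) (hd : d ≠ 0) :
    pvWhile0 4 gb j m = (shift0 (shift0 (shift0 gb j) j) j, true) := by
  obtain ⟨e0, e1, e2, e3⟩ := cells_of_col _ _ _ _ _ _ hcol
  have hP1 := shift0_pre gb j hP
  have hP2 := shift0_pre (shift0 gb j) j hP1
  obtain ⟨f0, f1, f2, f3⟩ := cells_of_col _ _ _ _ _ _ (shift0_col gb j hP hj)
  obtain ⟨g0, g1, g2, g3⟩ := cells_of_col _ _ _ _ _ _ (shift0_col (shift0 gb j) j hP1 hj)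
  obtain ⟨k0, k1, k2, k3⟩ :=
    cells_of_col _ _ _ _ _ _ (shift0_col (shift0 (shift0 gb j) j) j hP2 hj)
  rw [pvWhile0_succ, if_pos (by simp [e0]), pvWhile0_succ, if_pos (by simp [f0, e1]),
    pvWhile0_succ, if_pos (by simp [g0, f1, e2]),
    pvWhile0_succ, if_neg (by simp [k0, g1, f2, e3, hd])]

theorem while1_run1 (gb : List (List Int)) (j : Nat) (m : Bool) (a c d : Int)
    (hP : Pre_left_movement gb) (hj : j < 4)
    (hcol : colOf gb j = [a, 0, c, d]) (hc : c ≠ 0) :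
    pvWhile1 4 gb j m = (shift1 gb j, true) := by
  obtain ⟨e0, e1, e2, e3⟩ := cells_of_col _ _ _ _ _ _ hcol
  obtain ⟨f0, f1, f2, f3⟩ := cells_of_col _ _ _ _ _ _ (shift1_col gb j hP hj)
  rw [pvWhile1_succ, if_pos (by simp [e1]), pvWhile1_succ,
    if_neg (by simp [f1, e2, hc])]

theorem while1_run2 (gb : List (List Int)) (j : Nat) (m : Bool) (a d : Int)
    (hP : Pre_left_movement gb) (hj : j < 4)
    (hcol : colOf gb j = [a, 0, 0, d]) (hd : d ≠ 0) :
    pvWhile1 4 gb j m = (shift1 (shift1 gb j) j, true) := by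
  obtain ⟨e0, e1, e2, e3⟩ := cells_of_col _ _ _ _ _ _ hcol
  have hP1 := shift1_pre gb j hP
  obtain ⟨f0, f1, f2, f3⟩ := cells_of_col _ _ _ _ _ _ (shift1_col gb j hP hj)
  obtain ⟨g0, g1, g2, g3⟩ := cells_of_col _ _ _ _ _ _ (shift1_col (shift1 gb j) j hP1 hj)
  rw [pvWhile1_succ, if_pos (by simp [e1]), pvWhile1_succ, if_pos (by simp [f1, e2]),
    pvWhile1_succ, if_neg (by simp [g1, f2, e3, hd])]

theorem while2_run1 (gb : List (List Int)) (j : Nat) (m : Bool) (a b d : Int)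
    (hP : Pre_left_movement gb) (hj : j < 4)
    (hcol : colOf gb j = [a, b, 0, d]) (hd : d ≠ 0) :
    pvWhile2 4 gb j m = (shift2 gb j, true) := by
  obtain ⟨e0, e1, e2, e3⟩ := cells_of_col _ _ _ _ _ _ hcol
  obtain ⟨f0, f1, f2, f3⟩ := cells_of_col _ _ _ _ _ _ (shift2_col gb j hP hj)
  rw [pvWhile2_succ, if_pos (by simp [e2]), pvWhile2_succ,
    if_neg (by simp [f2, e3, hd])]

theorem pvStep_spec (gbA : List (List Int)) (m : Bool) (j : Nat)
    (hA : Pre_left_movement gbA) (hj : j < 4) :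
    (pvStep (gbA, m) j).2 = (if packCol (colOf gbA j) = colOf gbA j then m else true) ∧
      colOf (pvStep (gbA, m) j).1 j = packCol (colOf gbA j) := by
  by_cases hc0 : pvCell gbA 0 j = 0
  · by_cases hc1 : pvCell gbA 1 j = 0
    · by_cases hc2 : pvCell gbA 2 j = 0
      · by_cases hc3 : pvCell gbA 3 j = 0
        · have hcol0 : colOf gbA j = [0, 0, 0, 0] := by simp only [colOf, hc0, hc1, hc2, hc3]
          have hOut : (pvCell gbA 0 j != 0 || pvCell gbA 1 j != 0 || pvCell gbA 2 j != 0 || pvCell gbA 3 j != 0) = false := by simp [hc0, hc1, hc2, hc3]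
          rw [pvStep_eq, if_neg (by simp [hOut])]
          refine ⟨?_, ?_⟩
          · dsimp only; rw [hcol0, if_pos (by norm_num [packCol, List.replicate])]
          · dsimp only; rw [hcol0]; norm_num [packCol, List.replicate]
        · have hcol0 : colOf gbA j = [0, 0, 0, pvCell gbA 3 j] := by simp only [colOf, hc0, hc1, hc2]
          have hOut : (pvCell gbA 0 j != 0 || pvCell gbA 1 j != 0 || pvCell gbA 2 j != 0 || pvCell gbA 3 j != 0) = true := by simp [hc0, hc1, hc2, hc3]
          have hP1 := shift0_pre gbA j hA
          have hcolS1 : colOf (shift0 gbA j) j = [0, 0, pvCell gbA 3 j, 0] := by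
            rw [shift0_col (gbA) j hA hj]
            simp only [hc1, hc2]
          obtain ⟨e10, e11, e12, e13⟩ := cells_of_col _ _ _ _ _ _ hcolS1
          have hP2 := shift0_pre (shift0 gbA j) j hP1
          have hcolS2 : colOf (shift0 (shift0 gbA j) j) j = [0, pvCell gbA 3 j, 0, 0] := by
            rw [shift0_col (shift0 gbA j) j hP1 hj]
            simp only [e11, e12, e13]
          obtain ⟨e20, e21, e22, e23⟩ := cells_of_col _ _ _ _ _ _ hcolS2
          have hP3 := shift0_pre (shift0 (shift0 gbA j) j) j hP2
          have hcolS3 : colOf (shift0 (shift0 (shift0 gbA j) j) j) j = [pvCell gbA 3 j, 0, 0, 0] := by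
            rw [shift0_col (shift0 (shift0 gbA j) j) j hP2 hj]
            simp only [e21, e22, e23]
          obtain ⟨e30, e31, e32, e33⟩ := cells_of_col _ _ _ _ _ _ hcolS3
          have h1 : (if pvCell gbA 0 j == 0 then pvWhile0 4 gbA j m else (gbA, m)) = (shift0 (shift0 (shift0 gbA j) j) j, true) := by
            rw [if_pos (by simp [hc0])]
            exact while0_run3 gbA j m _ hA hj hcol0 hc3
          have h2 : pvStep2 (shift0 (shift0 (shift0 gbA j) j) j, true) j = (shift0 (shift0 (shift0 gbA j) j) j, true) := by
            unfold pvStep2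
            dsimp only
            rw [if_neg (by simp [e31, e32, e33])]
          have h3 : pvStep3 (shift0 (shift0 (shift0 gbA j) j) j, true) j = (shift0 (shift0 (shift0 gbA j) j) j, true) := by
            unfold pvStep3
            dsimp only
            rw [if_neg (by simp [e32, e33])]
          rw [pvStep_eq, if_pos hOut, h1, h2, h3]
          refine ⟨?_, ?_⟩
          · dsimp only; rw [hcol0, if_neg (by norm_num [packCol, List.replicate, hc3])]
          · dsimp only; rw [hcolS3, hcol0]; norm_num [packCol, List.replicate, hc3]
      · by_cases hc3 : pvCell gbA 3 j = 0
        · have hcol0 : colOf gbA j = [0, 0, pvCell gbA 2 j, 0] := by simp only [colOf, hc0, hc1, hc3]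
          have hOut : (pvCell gbA 0 j != 0 || pvCell gbA 1 j != 0 || pvCell gbA 2 j != 0 || pvCell gbA 3 j != 0) = true := by simp [hc0, hc1, hc2, hc3]
          have hP1 := shift0_pre gbA j hA
          have hcolS1 : colOf (shift0 gbA j) j = [0, pvCell gbA 2 j, 0, 0] := by
            rw [shift0_col (gbA) j hA hj]
            simp only [hc1, hc3]
          obtain ⟨e10, e11, e12, e13⟩ := cells_of_col _ _ _ _ _ _ hcolS1
          have hP2 := shift0_pre (shift0 gbA j) j hP1
          have hcolS2 : colOf (shift0 (shift0 gbA j) j) j = [pvCell gbA 2 j, 0, 0, 0] := by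
            rw [shift0_col (shift0 gbA j) j hP1 hj]
            simp only [e11, e12, e13]
          obtain ⟨e20, e21, e22, e23⟩ := cells_of_col _ _ _ _ _ _ hcolS2
          have h1 : (if pvCell gbA 0 j == 0 then pvWhile0 4 gbA j m else (gbA, m)) = (shift0 (shift0 gbA j) j, true) := by
            rw [if_pos (by simp [hc0])]
            exact while0_run2 gbA j m _ _ hA hj hcol0 hc2
          have h2 : pvStep2 (shift0 (shift0 gbA j) j, true) j = (shift0 (shift0 gbA j) j, true) := by
            unfold pvStep2
            dsimp only
            rw [if_neg (by simp [e21, e22, e23])]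
          have h3 : pvStep3 (shift0 (shift0 gbA j) j, true) j = (shift0 (shift0 gbA j) j, true) := by
            unfold pvStep3
            dsimp only
            rw [if_neg (by simp [e22, e23])]
          rw [pvStep_eq, if_pos hOut, h1, h2, h3]
          refine ⟨?_, ?_⟩
          · dsimp only; rw [hcol0, if_neg (by norm_num [packCol, List.replicate, hc2])]
          · dsimp only; rw [hcolS2, hcol0]; norm_num [packCol, List.replicate, hc2]
        · have hcol0 : colOf gbA j = [0, 0, pvCell gbA 2 j, pvCell gbA 3 j] := by simp only [colOf, hc0, hc1]
          have hOut : (pvCell gbA 0 j != 0 || pvCell gbA 1 j != 0 || pvCell gbA 2 j != 0 || pvCell gbA 3 j != 0) = true := by simp [hc0, hc1, hc2, hc3]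
          have hP1 := shift0_pre gbA j hA
          have hcolS1 : colOf (shift0 gbA j) j = [0, pvCell gbA 2 j, pvCell gbA 3 j, 0] := by
            rw [shift0_col (gbA) j hA hj]
            simp only [hc1]
          obtain ⟨e10, e11, e12, e13⟩ := cells_of_col _ _ _ _ _ _ hcolS1
          have hP2 := shift0_pre (shift0 gbA j) j hP1
          have hcolS2 : colOf (shift0 (shift0 gbA j) j) j = [pvCell gbA 2 j, pvCell gbA 3 j, 0, 0] := by
            rw [shift0_col (shift0 gbA j) j hP1 hj]
            simp only [e11, e12, e13]
          obtain ⟨e20, e21, e22, e23⟩ := cells_of_col _ _ _ _ _ _ hcolS2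
          have h1 : (if pvCell gbA 0 j == 0 then pvWhile0 4 gbA j m else (gbA, m)) = (shift0 (shift0 gbA j) j, true) := by
            rw [if_pos (by simp [hc0])]
            exact while0_run2 gbA j m _ _ hA hj hcol0 hc2
          have h2 : pvStep2 (shift0 (shift0 gbA j) j, true) j = (shift0 (shift0 gbA j) j, true) := by
            unfold pvStep2
            dsimp only
            rw [if_neg (by simp [e21, e22, e23, hc3])]
          have h3 : pvStep3 (shift0 (shift0 gbA j) j, true) j = (shift0 (shift0 gbA j) j, true) := by
            unfold pvStep3
            dsimp only
            rw [if_neg (by simp [e22, e23])]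
          rw [pvStep_eq, if_pos hOut, h1, h2, h3]
          refine ⟨?_, ?_⟩
          · dsimp only; rw [hcol0, if_neg (by norm_num [packCol, List.replicate, hc2, hc3])]
          · dsimp only; rw [hcolS2, hcol0]; norm_num [packCol, List.replicate, hc2, hc3]
    · by_cases hc2 : pvCell gbA 2 j = 0
      · by_cases hc3 : pvCell gbA 3 j = 0
        · have hcol0 : colOf gbA j = [0, pvCell gbA 1 j, 0, 0] := by simp only [colOf, hc0, hc2, hc3]
          have hOut : (pvCell gbA 0 j != 0 || pvCell gbA 1 j != 0 || pvCell gbA 2 j != 0 || pvCell gbA 3 j != 0) = true := by simp [hc0, hc1, hc2, hc3]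
          have hP1 := shift0_pre gbA j hA
          have hcolS1 : colOf (shift0 gbA j) j = [pvCell gbA 1 j, 0, 0, 0] := by
            rw [shift0_col (gbA) j hA hj]
            simp only [hc2, hc3]
          obtain ⟨e10, e11, e12, e13⟩ := cells_of_col _ _ _ _ _ _ hcolS1
          have h1 : (if pvCell gbA 0 j == 0 then pvWhile0 4 gbA j m else (gbA, m)) = (shift0 gbA j, true) := by
            rw [if_pos (by simp [hc0])]
            exact while0_run1 gbA j m _ _ _ hA hj hcol0 hc1
          have h2 : pvStep2 (shift0 gbA j, true) j = (shift0 gbA j, true) := by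
            unfold pvStep2
            dsimp only
            rw [if_neg (by simp [e11, e12, e13])]
          have h3 : pvStep3 (shift0 gbA j, true) j = (shift0 gbA j, true) := by
            unfold pvStep3
            dsimp only
            rw [if_neg (by simp [e12, e13])]
          rw [pvStep_eq, if_pos hOut, h1, h2, h3]
          refine ⟨?_, ?_⟩
          · dsimp only; rw [hcol0, if_neg (by norm_num [packCol, List.replicate, hc1])]
          · dsimp only; rw [hcolS1, hcol0]; norm_num [packCol, List.replicate, hc1]
        · have hcol0 : colOf gbA j = [0, pvCell gbA 1 j, 0, pvCell gbA 3 j] := by simp only [colOf, hc0, hc2]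
          have hOut : (pvCell gbA 0 j != 0 || pvCell gbA 1 j != 0 || pvCell gbA 2 j != 0 || pvCell gbA 3 j != 0) = true := by simp [hc0, hc1, hc2, hc3]
          have hP1 := shift0_pre gbA j hA
          have hcolS1 : colOf (shift0 gbA j) j = [pvCell gbA 1 j, 0, pvCell gbA 3 j, 0] := by
            rw [shift0_col (gbA) j hA hj]
            simp only [hc2]
          obtain ⟨e10, e11, e12, e13⟩ := cells_of_col _ _ _ _ _ _ hcolS1
          have h1 : (if pvCell gbA 0 j == 0 then pvWhile0 4 gbA j m else (gbA, m)) = (shift0 gbA j, true) := by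
            rw [if_pos (by simp [hc0])]
            exact while0_run1 gbA j m _ _ _ hA hj hcol0 hc1
          have hP2 := shift1_pre (shift0 gbA j) j hP1
          have hcolS2 : colOf (shift1 (shift0 gbA j) j) j = [pvCell gbA 1 j, pvCell gbA 3 j, 0, 0] := by
            rw [shift1_col (shift0 gbA j) j hP1 hj]
            try simp only [e10, e12, e13]
          obtain ⟨e20, e21, e22, e23⟩ := cells_of_col _ _ _ _ _ _ hcolS2
          have h2 : pvStep2 (shift0 gbA j, true) j = (shift1 (shift0 gbA j) j, true) := by
            unfold pvStep2
            dsimp only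
            rw [if_pos (by simp [e11, e12, e13, hc3])]
            exact while1_run1 (shift0 gbA j) j true _ _ _ hP1 hj hcolS1 hc3
          have h3 : pvStep3 (shift1 (shift0 gbA j) j, true) j = (shift1 (shift0 gbA j) j, true) := by
            unfold pvStep3
            dsimp only
            rw [if_neg (by simp [e22, e23])]
          rw [pvStep_eq, if_pos hOut, h1, h2, h3]
          refine ⟨?_, ?_⟩
          · dsimp only; rw [hcol0, if_neg (by norm_num [packCol, List.replicate, hc1, hc3])]
          · dsimp only; rw [hcolS2, hcol0]; norm_num [packCol, List.replicate, hc1, hc3]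
      · by_cases hc3 : pvCell gbA 3 j = 0
        · have hcol0 : colOf gbA j = [0, pvCell gbA 1 j, pvCell gbA 2 j, 0] := by simp only [colOf, hc0, hc3]
          have hOut : (pvCell gbA 0 j != 0 || pvCell gbA 1 j != 0 || pvCell gbA 2 j != 0 || pvCell gbA 3 j != 0) = true := by simp [hc0, hc1, hc2, hc3]
          have hP1 := shift0_pre gbA j hA
          have hcolS1 : colOf (shift0 gbA j) j = [pvCell gbA 1 j, pvCell gbA 2 j, 0, 0] := by
            rw [shift0_col (gbA) j hA hj]
            simp only [hc3]
          obtain ⟨e10, e11, e12, e13⟩ := cells_of_col _ _ _ _ _ _ hcolS1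
          have h1 : (if pvCell gbA 0 j == 0 then pvWhile0 4 gbA j m else (gbA, m)) = (shift0 gbA j, true) := by
            rw [if_pos (by simp [hc0])]
            exact while0_run1 gbA j m _ _ _ hA hj hcol0 hc1
          have h2 : pvStep2 (shift0 gbA j, true) j = (shift0 gbA j, true) := by
            unfold pvStep2
            dsimp only
            rw [if_neg (by simp [e11, e12, e13, hc2])]
          have h3 : pvStep3 (shift0 gbA j, true) j = (shift0 gbA j, true) := by
            unfold pvStep3
            dsimp only
            rw [if_neg (by simp [e12, e13])]
          rw [pvStep_eq, if_pos hOut, h1, h2, h3]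
          refine ⟨?_, ?_⟩
          · dsimp only; rw [hcol0, if_neg (by norm_num [packCol, List.replicate, hc1, hc2])]
          · dsimp only; rw [hcolS1, hcol0]; norm_num [packCol, List.replicate, hc1, hc2]
        · have hcol0 : colOf gbA j = [0, pvCell gbA 1 j, pvCell gbA 2 j, pvCell gbA 3 j] := by simp only [colOf, hc0]
          have hOut : (pvCell gbA 0 j != 0 || pvCell gbA 1 j != 0 || pvCell gbA 2 j != 0 || pvCell gbA 3 j != 0) = true := by simp [hc0, hc1, hc2, hc3]
          have hP1 := shift0_pre gbA j hA
          have hcolS1 : colOf (shift0 gbA j) j = [pvCell gbA 1 j, pvCell gbA 2 j, pvCell gbA 3 j, 0] := by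
            rw [shift0_col (gbA) j hA hj]
          obtain ⟨e10, e11, e12, e13⟩ := cells_of_col _ _ _ _ _ _ hcolS1
          have h1 : (if pvCell gbA 0 j == 0 then pvWhile0 4 gbA j m else (gbA, m)) = (shift0 gbA j, true) := by
            rw [if_pos (by simp [hc0])]
            exact while0_run1 gbA j m _ _ _ hA hj hcol0 hc1
          have h2 : pvStep2 (shift0 gbA j, true) j = (shift0 gbA j, true) := by
            unfold pvStep2
            dsimp only
            rw [if_neg (by simp [e11, e12, e13, hc2, hc3])]
          have h3 : pvStep3 (shift0 gbA j, true) j = (shift0 gbA j, true) := by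
            unfold pvStep3
            dsimp only
            rw [if_neg (by simp [e12, e13, hc3])]
          rw [pvStep_eq, if_pos hOut, h1, h2, h3]
          refine ⟨?_, ?_⟩
          · dsimp only; rw [hcol0, if_neg (by norm_num [packCol, List.replicate, hc1, hc2, hc3])]
          · dsimp only; rw [hcolS1, hcol0]; norm_num [packCol, List.replicate, hc1, hc2, hc3]
  · by_cases hc1 : pvCell gbA 1 j = 0
    · by_cases hc2 : pvCell gbA 2 j = 0
      · by_cases hc3 : pvCell gbA 3 j = 0
        · have hcol0 : colOf gbA j = [pvCell gbA 0 j, 0, 0, 0] := by simp only [colOf, hc1, hc2, hc3]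
          have hOut : (pvCell gbA 0 j != 0 || pvCell gbA 1 j != 0 || pvCell gbA 2 j != 0 || pvCell gbA 3 j != 0) = true := by simp [hc0, hc1, hc2, hc3]
          have h1 : (if pvCell gbA 0 j == 0 then pvWhile0 4 gbA j m else (gbA, m)) = (gbA, m) := by
            rw [if_neg (by simp [hc0])]
          obtain ⟨e00, e01, e02, e03⟩ := cells_of_col _ _ _ _ _ _ hcol0
          have h2 : pvStep2 (gbA, m) j = (gbA, m) := by
            unfold pvStep2
            dsimp only
            rw [if_neg (by simp [e01, e02, e03])]
          have h3 : pvStep3 (gbA, m) j = (gbA, m) := by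
            unfold pvStep3
            dsimp only
            rw [if_neg (by simp [e02, e03])]
          rw [pvStep_eq, if_pos hOut, h1, h2, h3]
          refine ⟨?_, ?_⟩
          · dsimp only; rw [hcol0, if_pos (by norm_num [packCol, List.replicate, hc0])]
          · dsimp only; rw [hcol0]; norm_num [packCol, List.replicate, hc0]
        · have hcol0 : colOf gbA j = [pvCell gbA 0 j, 0, 0, pvCell gbA 3 j] := by simp only [colOf, hc1, hc2]
          have hOut : (pvCell gbA 0 j != 0 || pvCell gbA 1 j != 0 || pvCell gbA 2 j != 0 || pvCell gbA 3 j != 0) = true := by simp [hc0, hc1, hc2, hc3]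
          have h1 : (if pvCell gbA 0 j == 0 then pvWhile0 4 gbA j m else (gbA, m)) = (gbA, m) := by
            rw [if_neg (by simp [hc0])]
          obtain ⟨e00, e01, e02, e03⟩ := cells_of_col _ _ _ _ _ _ hcol0
          have hP1 := shift1_pre (gbA) j hA
          have hcolS1 : colOf (shift1 (gbA) j) j = [pvCell gbA 0 j, 0, pvCell gbA 3 j, 0] := by
            rw [shift1_col (gbA) j hA hj]
            try simp only [e00, e02, e03]
          obtain ⟨e10, e11, e12, e13⟩ := cells_of_col _ _ _ _ _ _ hcolS1
          have hP2 := shift1_pre (shift1 (gbA) j) j hP1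
          have hcolS2 : colOf (shift1 (shift1 (gbA) j) j) j = [pvCell gbA 0 j, pvCell gbA 3 j, 0, 0] := by
            rw [shift1_col (shift1 (gbA) j) j hP1 hj]
            try simp only [e10, e12, e13]
          obtain ⟨e20, e21, e22, e23⟩ := cells_of_col _ _ _ _ _ _ hcolS2
          have h2 : pvStep2 (gbA, m) j = (shift1 (shift1 (gbA) j) j, true) := by
            unfold pvStep2
            dsimp only
            rw [if_pos (by simp [e01, e02, e03, hc3])]
            exact while1_run2 (gbA) j m _ _ hA hj hcol0 hc3
          have h3 : pvStep3 (shift1 (shift1 (gbA) j) j, true) j = (shift1 (shift1 (gbA) j) j, true) := by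
            unfold pvStep3
            dsimp only
            rw [if_neg (by simp [e22, e23])]
          rw [pvStep_eq, if_pos hOut, h1, h2, h3]
          refine ⟨?_, ?_⟩
          · dsimp only; rw [hcol0, if_neg (by norm_num [packCol, List.replicate, hc0, hc3])]
          · dsimp only; rw [hcolS2, hcol0]; norm_num [packCol, List.replicate, hc0, hc3]
      · by_cases hc3 : pvCell gbA 3 j = 0
        · have hcol0 : colOf gbA j = [pvCell gbA 0 j, 0, pvCell gbA 2 j, 0] := by simp only [colOf, hc1, hc3]
          have hOut : (pvCell gbA 0 j != 0 || pvCell gbA 1 j != 0 || pvCell gbA 2 j != 0 || pvCell gbA 3 j != 0) = true := by simp [hc0, hc1, hc2, hc3]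
          have h1 : (if pvCell gbA 0 j == 0 then pvWhile0 4 gbA j m else (gbA, m)) = (gbA, m) := by
            rw [if_neg (by simp [hc0])]
          obtain ⟨e00, e01, e02, e03⟩ := cells_of_col _ _ _ _ _ _ hcol0
          have hP1 := shift1_pre (gbA) j hA
          have hcolS1 : colOf (shift1 (gbA) j) j = [pvCell gbA 0 j, pvCell gbA 2 j, 0, 0] := by
            rw [shift1_col (gbA) j hA hj]
            try simp only [e00, e02, e03]
          obtain ⟨e10, e11, e12, e13⟩ := cells_of_col _ _ _ _ _ _ hcolS1
          have h2 : pvStep2 (gbA, m) j = (shift1 (gbA) j, true) := by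
            unfold pvStep2
            dsimp only
            rw [if_pos (by simp [e01, e02, e03, hc2])]
            exact while1_run1 (gbA) j m _ _ _ hA hj hcol0 hc2
          have h3 : pvStep3 (shift1 (gbA) j, true) j = (shift1 (gbA) j, true) := by
            unfold pvStep3
            dsimp only
            rw [if_neg (by simp [e12, e13])]
          rw [pvStep_eq, if_pos hOut, h1, h2, h3]
          refine ⟨?_, ?_⟩
          · dsimp only; rw [hcol0, if_neg (by norm_num [packCol, List.replicate, hc0, hc2])]
          · dsimp only; rw [hcolS1, hcol0]; norm_num [packCol, List.replicate, hc0, hc2]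
        · have hcol0 : colOf gbA j = [pvCell gbA 0 j, 0, pvCell gbA 2 j, pvCell gbA 3 j] := by simp only [colOf, hc1]
          have hOut : (pvCell gbA 0 j != 0 || pvCell gbA 1 j != 0 || pvCell gbA 2 j != 0 || pvCell gbA 3 j != 0) = true := by simp [hc0, hc1, hc2, hc3]
          have h1 : (if pvCell gbA 0 j == 0 then pvWhile0 4 gbA j m else (gbA, m)) = (gbA, m) := by
            rw [if_neg (by simp [hc0])]
          obtain ⟨e00, e01, e02, e03⟩ := cells_of_col _ _ _ _ _ _ hcol0
          have hP1 := shift1_pre (gbA) j hA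
          have hcolS1 : colOf (shift1 (gbA) j) j = [pvCell gbA 0 j, pvCell gbA 2 j, pvCell gbA 3 j, 0] := by
            rw [shift1_col (gbA) j hA hj]
            try simp only [e00, e02, e03]
          obtain ⟨e10, e11, e12, e13⟩ := cells_of_col _ _ _ _ _ _ hcolS1
          have h2 : pvStep2 (gbA, m) j = (shift1 (gbA) j, true) := by
            unfold pvStep2
            dsimp only
            rw [if_pos (by simp [e01, e02, e03, hc2, hc3])]
            exact while1_run1 (gbA) j m _ _ _ hA hj hcol0 hc2
          have h3 : pvStep3 (shift1 (gbA) j, true) j = (shift1 (gbA) j, true) := by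
            unfold pvStep3
            dsimp only
            rw [if_neg (by simp [e12, e13, hc3])]
          rw [pvStep_eq, if_pos hOut, h1, h2, h3]
          refine ⟨?_, ?_⟩
          · dsimp only; rw [hcol0, if_neg (by norm_num [packCol, List.replicate, hc0, hc2, hc3])]
          · dsimp only; rw [hcolS1, hcol0]; norm_num [packCol, List.replicate, hc0, hc2, hc3]
    · by_cases hc2 : pvCell gbA 2 j = 0
      · by_cases hc3 : pvCell gbA 3 j = 0
        · have hcol0 : colOf gbA j = [pvCell gbA 0 j, pvCell gbA 1 j, 0, 0] := by simp only [colOf, hc2, hc3]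
          have hOut : (pvCell gbA 0 j != 0 || pvCell gbA 1 j != 0 || pvCell gbA 2 j != 0 || pvCell gbA 3 j != 0) = true := by simp [hc0, hc1, hc2, hc3]
          have h1 : (if pvCell gbA 0 j == 0 then pvWhile0 4 gbA j m else (gbA, m)) = (gbA, m) := by
            rw [if_neg (by simp [hc0])]
          obtain ⟨e00, e01, e02, e03⟩ := cells_of_col _ _ _ _ _ _ hcol0
          have h2 : pvStep2 (gbA, m) j = (gbA, m) := by
            unfold pvStep2
            dsimp only
            rw [if_neg (by simp [e01, e02, e03, hc1])]
          have h3 : pvStep3 (gbA, m) j = (gbA, m) := by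
            unfold pvStep3
            dsimp only
            rw [if_neg (by simp [e02, e03])]
          rw [pvStep_eq, if_pos hOut, h1, h2, h3]
          refine ⟨?_, ?_⟩
          · dsimp only; rw [hcol0, if_pos (by norm_num [packCol, List.replicate, hc0, hc1])]
          · dsimp only; rw [hcol0]; norm_num [packCol, List.replicate, hc0, hc1]
        · have hcol0 : colOf gbA j = [pvCell gbA 0 j, pvCell gbA 1 j, 0, pvCell gbA 3 j] := by simp only [colOf, hc2]
          have hOut : (pvCell gbA 0 j != 0 || pvCell gbA 1 j != 0 || pvCell gbA 2 j != 0 || pvCell gbA 3 j != 0) = true := by simp [hc0, hc1, hc2, hc3]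
          have h1 : (if pvCell gbA 0 j == 0 then pvWhile0 4 gbA j m else (gbA, m)) = (gbA, m) := by
            rw [if_neg (by simp [hc0])]
          obtain ⟨e00, e01, e02, e03⟩ := cells_of_col _ _ _ _ _ _ hcol0
          have h2 : pvStep2 (gbA, m) j = (gbA, m) := by
            unfold pvStep2
            dsimp only
            rw [if_neg (by simp [e01, e02, e03, hc1, hc3])]
          have hP1 := shift2_pre (gbA) j hA
          have hcolS1 : colOf (shift2 (gbA) j) j = [pvCell gbA 0 j, pvCell gbA 1 j, pvCell gbA 3 j, 0] := by
            rw [shift2_col (gbA) j hA hj]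
            try simp only [e00, e01, e03]
          have h3 : pvStep3 (gbA, m) j = (shift2 (gbA) j, true) := by
            unfold pvStep3
            dsimp only
            rw [if_pos (by simp [e02, e03, hc3])]
            exact while2_run1 (gbA) j m _ _ _ hA hj hcol0 hc3
          rw [pvStep_eq, if_pos hOut, h1, h2, h3]
          refine ⟨?_, ?_⟩
          · dsimp only; rw [hcol0, if_neg (by norm_num [packCol, List.replicate, hc0, hc1, hc3])]
          · dsimp only; rw [hcolS1, hcol0]; norm_num [packCol, List.replicate, hc0, hc1, hc3]
      · by_cases hc3 : pvCell gbA 3 j = 0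
        · have hcol0 : colOf gbA j = [pvCell gbA 0 j, pvCell gbA 1 j, pvCell gbA 2 j, 0] := by simp only [colOf, hc3]
          have hOut : (pvCell gbA 0 j != 0 || pvCell gbA 1 j != 0 || pvCell gbA 2 j != 0 || pvCell gbA 3 j != 0) = true := by simp [hc0, hc1, hc2, hc3]
          have h1 : (if pvCell gbA 0 j == 0 then pvWhile0 4 gbA j m else (gbA, m)) = (gbA, m) := by
            rw [if_neg (by simp [hc0])]
          obtain ⟨e00, e01, e02, e03⟩ := cells_of_col _ _ _ _ _ _ hcol0
          have h2 : pvStep2 (gbA, m) j = (gbA, m) := by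
            unfold pvStep2
            dsimp only
            rw [if_neg (by simp [e01, e02, e03, hc1, hc2])]
          have h3 : pvStep3 (gbA, m) j = (gbA, m) := by
            unfold pvStep3
            dsimp only
            rw [if_neg (by simp [e02, e03, hc2])]
          rw [pvStep_eq, if_pos hOut, h1, h2, h3]
          refine ⟨?_, ?_⟩
          · dsimp only; rw [hcol0, if_pos (by norm_num [packCol, List.replicate, hc0, hc1, hc2])]
          · dsimp only; rw [hcol0]; norm_num [packCol, List.replicate, hc0, hc1, hc2]
        · have hcol0 : colOf gbA j = [pvCell gbA 0 j, pvCell gbA 1 j, pvCell gbA 2 j, pvCell gbA 3 j] := rfl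
          have hOut : (pvCell gbA 0 j != 0 || pvCell gbA 1 j != 0 || pvCell gbA 2 j != 0 || pvCell gbA 3 j != 0) = true := by simp [hc0, hc1, hc2, hc3]
          have h1 : (if pvCell gbA 0 j == 0 then pvWhile0 4 gbA j m else (gbA, m)) = (gbA, m) := by
            rw [if_neg (by simp [hc0])]
          obtain ⟨e00, e01, e02, e03⟩ := cells_of_col _ _ _ _ _ _ hcol0
          have h2 : pvStep2 (gbA, m) j = (gbA, m) := by
            unfold pvStep2
            dsimp only
            rw [if_neg (by simp [e01, e02, e03, hc1, hc2, hc3])]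
          have h3 : pvStep3 (gbA, m) j = (gbA, m) := by
            unfold pvStep3
            dsimp only
            rw [if_neg (by simp [e02, e03, hc2, hc3])]
          rw [pvStep_eq, if_pos hOut, h1, h2, h3]
          refine ⟨?_, ?_⟩
          · dsimp only; rw [hcol0, if_pos (by norm_num [packCol, List.replicate, hc0, hc1, hc2, hc3])]
          · dsimp only; rw [hcol0]; norm_num [packCol, List.replicate, hc0, hc1, hc2, hc3]

theorem step_both (sA sB : List (List Int) × Bool) (j : Nat)
    (hA : Pre_left_movement sA.1) (hB : Pre_left_movement sB.1)
    (hm : sA.2 = sB.2) (hj : j < 4)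
    (hcols : ∀ j', j' < 4 → colOf sA.1 j' = colOf sB.1 j') :
    (pvStep sA j).2 = (bStep sB j).2 ∧ Pre_left_movement (pvStep sA j).1 ∧
      Pre_left_movement (bStep sB j).1 ∧
      ∀ j', j' < 4 → colOf (pvStep sA j).1 j' = colOf (bStep sB j).1 j' := by
  obtain ⟨gbA, m⟩ := sA
  obtain ⟨gbB, m2⟩ := sB
  cases hm
  obtain ⟨ha2, hacol⟩ := pvStep_spec gbA m j hA hj
  obtain ⟨hb2, hbpre, hbcol, hbother⟩ := bStep_spec gbB m j hB hj
  obtain ⟨hapre, haother⟩ := pvStep_inv gbA m j hA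
  have hcj := hcols j hj
  refine ⟨?_, hapre, hbpre, ?_⟩
  · rw [ha2, hb2, hcj]
  · intro j' h4
    by_cases h : j' = j
    · subst h; rw [hacol, hbcol, hcj]
    · rw [haother j' (fun hh => h hh.symm), hbother j' h4 h, hcols j' h4]

-- ===== VERDICT (by name: the statement is the Claim_ definition above) =====
theorem left_movement_spec : Claim_equal_left_movement := by
  intro gb hDom hPre
  unfold Spec_left_movement left_movement left_movement_alt
  have hrange : PySem.List.pyRange 0 4 1 = [0, 1, 2, 3] := by decide
  rw [hrange]
  simp only [List.foldl]
  norm_num [Int.toNat]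
  have h0 := step_both (gb, false) (gb, false) 0 hPre hPre rfl (by norm_num)
    (fun _ _ => rfl)
  have h1 := step_both _ _ 1 h0.2.1 h0.2.2.1 h0.1 (by norm_num) h0.2.2.2
  have h2 := step_both _ _ 2 h1.2.1 h1.2.2.1 h1.1 (by norm_num) h1.2.2.2
  have h3 := step_both _ _ 3 h2.2.1 h2.2.2.1 h2.1 (by norm_num) h2.2.2.2
  exact h3.1
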